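-- pv_equiv track=rewrite | github.com/HXMou/python_bootscamp | 07-function/main.py | get_fisrt_smallets_number
-- ===== SOURCE A (Python) =====
-- def get_fisrt_smallets_number(list_numbers, even=True):
--     list_numbers = sorted(list_numbers) # sorted() is a fucntion that orders the number inside a list.
--     for numbers in list_numbers:
--         if even:
--             if numbers % 2 == 0:
--                 return numbers
--         else:
--             if numbers % 2 != 0:
--                 return numbers
-- ===== SOURCE B (Python) =====
-- def get_fisrt_smallets_number(list_numbers, even=True):
--     # single pass: running minimum of the elements with the wanted parity
--     best = None
--     for x in list_numbers:
--         if even: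
--             ok = x % 2 == 0
--         else:
--             ok = x % 2 != 0
--         if ok:
--             if best is None or x < best:
--                 best = x
--     return best
-- ===== Notes on version B (the rewrite author's own statement) =====
-- stated objective: alternative
-- what changed: Replaces sort-then-scan-for-first-match with a single pass that keeps a running minimum of the elements of the wanted parity.
import Mathlib
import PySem

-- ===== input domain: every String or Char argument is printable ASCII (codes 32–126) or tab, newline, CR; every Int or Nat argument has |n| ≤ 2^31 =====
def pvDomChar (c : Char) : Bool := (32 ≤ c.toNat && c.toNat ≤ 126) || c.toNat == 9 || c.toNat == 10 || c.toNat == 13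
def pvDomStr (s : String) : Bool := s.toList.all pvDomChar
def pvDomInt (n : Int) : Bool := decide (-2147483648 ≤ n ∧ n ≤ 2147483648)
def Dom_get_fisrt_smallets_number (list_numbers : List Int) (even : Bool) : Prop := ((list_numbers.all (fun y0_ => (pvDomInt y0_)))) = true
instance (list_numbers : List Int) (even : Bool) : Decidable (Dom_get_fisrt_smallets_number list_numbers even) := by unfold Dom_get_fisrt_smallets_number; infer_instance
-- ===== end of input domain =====

-- B replaces A's sort-then-return-first-match by a single-pass running minimum over the
-- elements of the wanted parity (no sort).

-- ===== PORT A =====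
-- the 'for numbers in list_numbers: …' loop of A, returning on the first parity match
def pvScanA (even : Bool) : List Int → Option Int
  | [] => none
  | x :: xs =>
    if even then
      (if PySem.Int.mod x 2 == 0 then some x else pvScanA even xs)
    else
      (if PySem.Int.mod x 2 != 0 then some x else pvScanA even xs)

def get_fisrt_smallets_number (list_numbers : List Int) (even : Bool) : Option Int :=
  pvScanA even (PySem.List.sorted list_numbers (fun x => x) false)

-- ===== PORT B =====
-- the body of B's loop: test the parity, then update the running minimum
def pvBStep (even : Bool) (best : Option Int) (x : Int) : Option Int :=
  let ok := if even then PySem.Int.mod x 2 == 0 else PySem.Int.mod x 2 != 0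
  if ok then
    match best with
    | none => some x
    | some m => if x < m then some x else some m
  else best

def get_fisrt_smallets_number_alt (list_numbers : List Int) (even : Bool) : Option Int :=
  list_numbers.foldl (pvBStep even) none

-- ===== PRECONDITION & SPEC =====
def Spec_get_fisrt_smallets_number (list_numbers : List Int) (even : Bool) (out : Option Int) : Prop := out = get_fisrt_smallets_number_alt list_numbers even
instance (list_numbers : List Int) (even : Bool) (out : Option Int) : Decidable (Spec_get_fisrt_smallets_number list_numbers even out) := by unfold Spec_get_fisrt_smallets_number; infer_instance

-- ===== CLAIM (what is proved, stated in full; the proofs are below) =====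
def Claim_equal_get_fisrt_smallets_number : Prop := ∀ (list_numbers : List Int) (even : Bool), Dom_get_fisrt_smallets_number list_numbers even → Spec_get_fisrt_smallets_number list_numbers even (get_fisrt_smallets_number list_numbers even)

-- ===== LEMMAS AND PROOFS =====

-- the parity test both programs use
def pvCond (even : Bool) (x : Int) : Bool :=
  if even then PySem.Int.mod x 2 == 0 else PySem.Int.mod x 2 != 0

-- the min-accumulation step of B's loop, restricted to matching elements
def pvMStep (best : Option Int) (x : Int) : Option Int :=
  match best with
  | none => some x
  | some m => if x < m then some x else some m

-- A's scan is the head of the filtered list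
theorem pvScanA_eq_head (even : Bool) (l : List Int) :
    pvScanA even l = (l.filter (pvCond even)).head? := by
  induction l with
  | nil => rfl
  | cons x xs ih =>
    simp only [pvScanA, pvCond, List.filter_cons] at *
    cases even <;> simp only [Bool.false_eq_true, if_false, if_true] <;>
      split <;> simp_all

-- B's step is the min-step guarded by the parity condition
theorem pvBStep_eq (even : Bool) (best : Option Int) (x : Int) :
    pvBStep even best x = if pvCond even x then pvMStep best x else best := rfl

-- B's fold over the whole list is the min-fold over the filtered list
theorem pvFold_eq_mfold (even : Bool) (l : List Int) (acc : Option Int) :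
    l.foldl (pvBStep even) acc = (l.filter (pvCond even)).foldl pvMStep acc := by
  induction l generalizing acc with
  | nil => rfl
  | cons x xs ih =>
    rw [List.foldl_cons, List.filter_cons, pvBStep_eq]
    by_cases h : pvCond even x = true
    · rw [if_pos h, if_pos h, List.foldl_cons, ih]
    · rw [if_neg h, if_neg h, ih]

-- min-fold starting from some a never returns none
theorem pvMfold_some_ne_none (k : List Int) (a : Int) :
    k.foldl pvMStep (some a) ≠ none := by
  induction k generalizing a with
  | nil => simp
  | cons x xs ih =>
    simp only [List.foldl_cons, pvMStep]
    split <;> exact ih _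

theorem pvMfold_none_iff (k : List Int) :
    k.foldl pvMStep none = none ↔ k = [] := by
  cases k with
  | nil => simp
  | cons x xs =>
    simp only [List.foldl_cons, pvMStep]
    constructor
    · intro h; exact absurd h (pvMfold_some_ne_none xs x)
    · intro h; cases h

-- the min-fold result is a lower bound of the accumulator and everything read
theorem pvMfold_some_char (k : List Int) (a m : Int)
    (h : k.foldl pvMStep (some a) = some m) :
    (m = a ∨ m ∈ k) ∧ m ≤ a ∧ ∀ x ∈ k, m ≤ x := by
  induction k generalizing a with
  | nil =>
    simp only [List.foldl_nil, Option.some.injEq] at h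
    subst h; simp
  | cons x xs ih =>
    simp only [List.foldl_cons, pvMStep] at h
    by_cases hx : x < a
    · simp only [if_pos hx] at h
      obtain ⟨hmem, hle, hall⟩ := ih x h
      refine ⟨?_, ?_, ?_⟩
      · rcases hmem with h1 | h1
        · exact Or.inr (by simp [h1])
        · exact Or.inr (List.mem_cons_of_mem _ h1)
      · omega
      · intro y hy
        rcases List.mem_cons.mp hy with h1 | h1
        · omega
        · exact hall y h1
    · simp only [if_neg hx] at h
      obtain ⟨hmem, hle, hall⟩ := ih a h
      refine ⟨?_, hle, ?_⟩
      · rcases hmem with h1 | h1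
        · exact Or.inl h1
        · exact Or.inr (List.mem_cons_of_mem _ h1)
      · intro y hy
        rcases List.mem_cons.mp hy with h1 | h1
        · omega
        · exact hall y h1

theorem pvMfold_min (k : List Int) (m : Int)
    (h : k.foldl pvMStep none = some m) :
    m ∈ k ∧ ∀ x ∈ k, m ≤ x := by
  cases k with
  | nil => simp at h
  | cons x xs =>
    simp only [List.foldl_cons, pvMStep] at h
    obtain ⟨hmem, hle, hall⟩ := pvMfold_some_char xs x m h
    refine ⟨?_, ?_⟩
    · rcases hmem with h1 | h1
      · simp [h1]
      · exact List.mem_cons_of_mem _ h1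
    · intro y hy
      rcases List.mem_cons.mp hy with h1 | h1
      · omega
      · exact hall y h1

-- head of a ≤-sorted list is a lower bound
theorem pvHead_min (k : List Int) (m : Int) (hp : k.Pairwise (· ≤ ·))
    (h : k.head? = some m) : m ∈ k ∧ ∀ x ∈ k, m ≤ x := by
  cases k with
  | nil => simp at h
  | cons x xs =>
    simp only [List.head?_cons, Option.some.injEq] at h
    subst h
    rw [List.pairwise_cons] at hp
    refine ⟨List.mem_cons_self, ?_⟩
    intro y hy
    rcases List.mem_cons.mp hy with h1 | h1
    · omega
    · exact hp.1 y h1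

-- ===== VERDICT (by name: the statement is the Claim_ definition above) =====
theorem get_fisrt_smallets_number_spec : Claim_equal_get_fisrt_smallets_number := by
  intro l even _
  unfold Spec_get_fisrt_smallets_number
  unfold get_fisrt_smallets_number get_fisrt_smallets_number_alt
  rw [pvScanA_eq_head]
  rw [pvFold_eq_mfold]
  set s := PySem.List.sorted l (fun x => x) false with hs
  have hperm : (s.filter (pvCond even)).Perm (l.filter (pvCond even)) :=
    (PySem.List.sorted_perm l (fun x => x) false).filter _
  have hpair : (s.filter (pvCond even)).Pairwise (· ≤ ·) :=
    (PySem.List.sorted_pairwise l (fun x => x)).filter _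
  cases hA : (s.filter (pvCond even)).head? with
  | none =>
    have hsnil : s.filter (pvCond even) = [] := List.head?_eq_none_iff.mp hA
    have hnil : l.filter (pvCond even) = [] := (hsnil ▸ hperm).nil_eq.symm
    rw [hnil]
    rfl
  | some a =>
    obtain ⟨hamem, hale⟩ := pvHead_min _ a hpair hA
    cases hB : (l.filter (pvCond even)).foldl pvMStep none with
    | none =>
      exfalso
      have hnil := (pvMfold_none_iff _).mp hB
      have : s.filter (pvCond even) = [] := (hnil ▸ hperm).symm.nil_eq.symm
      simp [this] at hA
    | some b =>
      obtain ⟨hbmem, hble⟩ := pvMfold_min _ b hB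
      have h1 : a ≤ b := hale b (hperm.mem_iff.mpr hbmem)
      have h2 : b ≤ a := hble a (hperm.mem_iff.mp hamem)
      have : a = b := le_antisymm h1 h2
      simp [this]
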